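-- pv_equiv track=rewrite | github.com/endomorphosis/ipfs_accelerate_py | test/hardware_detection/qnn_support.py | _estimate_power_efficiency
-- ===== SOURCE A (Python) =====
-- from typing import Dict, List, Optional, Tuple, Union, Any
--
-- def _estimate_power_efficiency(model_name: str, optimizations: List[str]) -> float:
--     """Estimate power efficiency score (0-100, higher is better)"""
--     # Base score for the model type
--     if "tiny" in model_name or "mini" in model_name:
--         base_score = 85
--     elif "small" in model_name:
--         base_score = 75
--     elif "base" in model_name:
--         base_score = 65
--     elif "large" in model_name:
--         base_score = 45
--     else:
--         base_score = 60
--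
--     # Adjust based on optimizations
--     for opt in optimizations:
--         if "quantization:fp16" in opt:
--             base_score += 5
--         elif "quantization:int8" in opt:
--             base_score += 10
--         elif "quantization:int4" in opt:
--             base_score += 15
--         elif "pruning:" in opt:
--             base_score += 5
--         elif "kv_cache_optimization" in opt:
--             base_score += 8
--         elif "compression:" in opt:
--             base_score += 5
--
--     # Limit to 0-100 range
--     return min(100, max(0, base_score))
-- ===== SOURCE B (Python) =====
-- from typing import List
--
-- def _estimate_power_efficiency(model_name: str, optimizations: List[str]) -> float:
--     # Base score: scan keyword rules from lowest to highest priority; the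
--     # last assignment (highest-priority keyword present) wins.
--     base = 60
--     for kws, s in [(("large",), 45), (("base",), 65), (("small",), 75), (("tiny", "mini"), 85)]:
--         if any(k in model_name for k in kws):
--             base = s
--     # Optimization bonus, rule-major: for each rule (in priority order),
--     # add its delta once per still-unclaimed optimization matching it, then
--     # remove matched optimizations so lower-priority rules cannot claim them.
--     remaining = list(optimizations)
--     for pat, d in [("quantization:fp16", 5), ("quantization:int8", 10), ("quantization:int4", 15),
--                    ("pruning:", 5), ("kv_cache_optimization", 8), ("compression:", 5)]:
--         base += d * len([o for o in remaining if pat in o])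
--         remaining = [o for o in remaining if pat not in o]
--     return min(100, max(0, base))
-- ===== Notes on version B (the rewrite author's own statement) =====
-- stated objective: alternative
-- what changed: Base score is computed by a lowest-to-highest-priority scan where the last matching assignment wins (instead of a first-match cascade), and the optimization bonus is computed rule-major: for each rule in priority order B counts and removes the matching optimizations from a shrinking pool, instead of iterating optimizations and finding each one's first matching branch.
import Mathlib
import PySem

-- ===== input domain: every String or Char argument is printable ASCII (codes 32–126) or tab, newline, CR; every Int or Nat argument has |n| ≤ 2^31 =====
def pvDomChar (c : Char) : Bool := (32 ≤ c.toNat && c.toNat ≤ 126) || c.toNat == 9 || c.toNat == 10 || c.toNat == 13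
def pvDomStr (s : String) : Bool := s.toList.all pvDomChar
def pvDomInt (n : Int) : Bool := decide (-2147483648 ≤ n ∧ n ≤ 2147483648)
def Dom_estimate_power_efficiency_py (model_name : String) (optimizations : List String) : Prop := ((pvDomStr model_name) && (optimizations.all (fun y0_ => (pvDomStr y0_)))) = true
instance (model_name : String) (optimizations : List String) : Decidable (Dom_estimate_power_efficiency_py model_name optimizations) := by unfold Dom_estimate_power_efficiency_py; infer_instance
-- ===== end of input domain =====

-- B computes the base score by a last-assignment-wins scan over reversed-priority keyword rules
-- and the optimization bonus rule-major over a shrinking pool of optimizations (alternative, same cost).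

-- ===== PORT A =====
def estimate_power_efficiency_py (model_name : String) (optimizations : List String) : Int :=
  let base : Int :=
    if PySem.Str.isIn "tiny" model_name || PySem.Str.isIn "mini" model_name then 85
    else if PySem.Str.isIn "small" model_name then 75
    else if PySem.Str.isIn "base" model_name then 65
    else if PySem.Str.isIn "large" model_name then 45
    else 60
  let base := optimizations.foldl (fun b opt =>
    if PySem.Str.isIn "quantization:fp16" opt then b + 5
    else if PySem.Str.isIn "quantization:int8" opt then b + 10
    else if PySem.Str.isIn "quantization:int4" opt then b + 15
    else if PySem.Str.isIn "pruning:" opt then b + 5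
    else if PySem.Str.isIn "kv_cache_optimization" opt then b + 8
    else if PySem.Str.isIn "compression:" opt then b + 5
    else b) base
  min 100 (max 0 base)

-- ===== PORT B =====
-- base rules, lowest to highest priority; the last matching assignment wins
def pvBaseRulesRev : List (List String × Int) :=
  [(["large"], 45), (["base"], 65), (["small"], 75), (["tiny", "mini"], 85)]

def pvOptRules : List (String × Int) :=
  [("quantization:fp16", 5), ("quantization:int8", 10), ("quantization:int4", 15),
   ("pruning:", 5), ("kv_cache_optimization", 8), ("compression:", 5)]

-- rule-major loop: per rule, count and remove the matching optimizations from the pool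
def pvApplyRules : List (String × Int) → Int → List String → Int
  | [], score, _ => score
  | (p, d) :: rs, score, remaining =>
      pvApplyRules rs (score + d * ((remaining.filter (fun o => PySem.Str.isIn p o)).length : Int))
        (remaining.filter (fun o => ! PySem.Str.isIn p o))

def estimate_power_efficiency_py_alt (model_name : String) (optimizations : List String) : Int :=
  let base : Int := pvBaseRulesRev.foldl
    (fun b r => if r.1.any (fun k => PySem.Str.isIn k model_name) then r.2 else b) 60
  min 100 (max 0 (pvApplyRules pvOptRules base optimizations))

-- ===== PRECONDITION & SPEC =====
def Spec_estimate_power_efficiency_py (model_name : String) (optimizations : List String) (out : Int) : Prop := out = estimate_power_efficiency_py_alt model_name optimizations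
instance (model_name : String) (optimizations : List String) (out : Int) : Decidable (Spec_estimate_power_efficiency_py model_name optimizations out) := by unfold Spec_estimate_power_efficiency_py; infer_instance

-- ===== CLAIM (what is proved, stated in full; the proofs are below) =====
def Claim_equal_estimate_power_efficiency_py : Prop := ∀ (model_name : String) (optimizations : List String), Dom_estimate_power_efficiency_py model_name optimizations → Spec_estimate_power_efficiency_py model_name optimizations (estimate_power_efficiency_py model_name optimizations)

-- ===== LEMMAS AND PROOFS =====
-- first-match delta of an optimization against a rule list (proof-only abstraction)
def pvFirstDelta : List (String × Int) → String → Int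
  | [], _ => 0
  | (p, d) :: rs, o => if PySem.Str.isIn p o then d else pvFirstDelta rs o

theorem pvSum_split (p : String) (d : Int) (rs : List (String × Int)) (l : List String) :
    (l.map (pvFirstDelta ((p, d) :: rs))).sum =
      d * ((l.filter (fun o => PySem.Str.isIn p o)).length : Int) +
        ((l.filter (fun o => ! PySem.Str.isIn p o)).map (pvFirstDelta rs)).sum := by
  induction l with
  | nil => simp
  | cons x xs ih =>
      rw [List.map_cons, List.sum_cons, ih]
      by_cases h : PySem.Chars.isIn p.toList x.toList <;>
        simp [pvFirstDelta, PySem.Str.isIn, List.filter_cons, h] <;> ring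

theorem pvApplyRules_eq (rs : List (String × Int)) (s : Int) (l : List String) :
    pvApplyRules rs s l = s + (l.map (pvFirstDelta rs)).sum := by
  induction rs generalizing s l with
  | nil => simp [pvApplyRules, pvFirstDelta]
  | cons r rs ih =>
      obtain ⟨p, d⟩ := r
      rw [pvApplyRules, ih, pvSum_split]
      ring

theorem pvStep_eq (b : Int) (opt : String) :
    (if PySem.Str.isIn "quantization:fp16" opt then b + 5
     else if PySem.Str.isIn "quantization:int8" opt then b + 10
     else if PySem.Str.isIn "quantization:int4" opt then b + 15
     else if PySem.Str.isIn "pruning:" opt then b + 5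
     else if PySem.Str.isIn "kv_cache_optimization" opt then b + 8
     else if PySem.Str.isIn "compression:" opt then b + 5
     else b) = b + pvFirstDelta pvOptRules opt := by
  simp only [pvOptRules, pvFirstDelta]
  split_ifs <;> simp

theorem pvFoldl_eq (l : List String) (b : Int) :
    l.foldl (fun b opt =>
      if PySem.Str.isIn "quantization:fp16" opt then b + 5
      else if PySem.Str.isIn "quantization:int8" opt then b + 10
      else if PySem.Str.isIn "quantization:int4" opt then b + 15
      else if PySem.Str.isIn "pruning:" opt then b + 5
      else if PySem.Str.isIn "kv_cache_optimization" opt then b + 8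
      else if PySem.Str.isIn "compression:" opt then b + 5
      else b) b = b + (l.map (pvFirstDelta pvOptRules)).sum := by
  induction l generalizing b with
  | nil => simp
  | cons x xs ih => rw [List.foldl_cons, pvStep_eq, ih]; simp; ring

theorem pvBase_eq (m : String) :
    (pvBaseRulesRev.foldl
      (fun b r => if r.1.any (fun k => PySem.Str.isIn k m) then r.2 else b) (60 : Int)) =
      (if PySem.Str.isIn "tiny" m || PySem.Str.isIn "mini" m then (85 : Int)
       else if PySem.Str.isIn "small" m then 75
       else if PySem.Str.isIn "base" m then 65
       else if PySem.Str.isIn "large" m then 45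
       else 60) := by
  simp only [pvBaseRulesRev, List.foldl_cons, List.foldl_nil, List.any_cons, List.any_nil]
  split_ifs <;> simp_all

-- ===== VERDICT (by name: the statement is the Claim_ definition above) =====
theorem estimate_power_efficiency_py_spec : Claim_equal_estimate_power_efficiency_py := by
  intro m opts _
  unfold Spec_estimate_power_efficiency_py estimate_power_efficiency_py estimate_power_efficiency_py_alt
  simp only [pvFoldl_eq, pvBase_eq, pvApplyRules_eq]
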